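-- pv_equiv track=rewrite | github.com/asiffmahmudd/python-csd1233 | Assignments/7/c0837117_A07/a07/C0837117_Q01.py | get_proper_case_name
-- ===== SOURCE A (Python) =====
-- def get_proper_case_name(name):
--     correct_case_name = ""
--     for ch in range(0, len(name)):
--         if ch == 0:
--             correct_case_name = name[ch].upper()
--         else:
--             correct_case_name += name[ch].lower()
--
--     return correct_case_name
-- ===== SOURCE B (Python) =====
-- def get_proper_case_name(name):
--     return name[:1].upper() + name[1:].lower()
-- ===== Notes on version B (the rewrite author's own statement) =====
-- stated objective: simpler
-- what changed: Replaces the indexed loop with an if ch==0 branch and incremental string concatenation by a single straight-line expression over two slices: uppercase name[:1] plus lowercase name[1:].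
import Mathlib
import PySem

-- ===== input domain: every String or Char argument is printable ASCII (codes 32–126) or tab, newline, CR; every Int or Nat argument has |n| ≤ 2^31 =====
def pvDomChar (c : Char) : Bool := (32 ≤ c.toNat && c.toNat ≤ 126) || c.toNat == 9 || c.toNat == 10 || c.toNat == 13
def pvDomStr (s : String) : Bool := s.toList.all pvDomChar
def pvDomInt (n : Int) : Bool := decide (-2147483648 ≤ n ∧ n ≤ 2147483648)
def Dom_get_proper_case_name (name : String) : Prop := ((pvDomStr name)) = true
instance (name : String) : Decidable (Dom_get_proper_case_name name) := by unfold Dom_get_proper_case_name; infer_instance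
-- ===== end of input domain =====

-- B replaces A's indexed loop (if ch == 0 branch, incremental concatenation) by one
-- straight-line expression over two slices: upper(name[:1]) ++ lower(name[1:]); objective: simpler.

-- ===== PORT A =====
-- name[ch].upper()/.lower() on a one-char string is ported with Chars.upperChar/lowerChar
-- (exact on the ASCII domain); the loop is a foldl over range(0, len(name)).
def get_proper_case_name (name : String) : String :=
  String.ofList <|
    (PySem.List.pyRange 0 (name.toList.length : Int) 1).foldl
      (fun acc ch =>
        if ch == 0 then [PySem.Chars.upperChar (PySem.List.pyGetD name.toList ch ' ')]
        else acc ++ [PySem.Chars.lowerChar (PySem.List.pyGetD name.toList ch ' ')])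
      []

-- ===== PORT B =====
def get_proper_case_name_alt (name : String) : String :=
  String.ofList
    (PySem.Chars.upper (PySem.List.slice name.toList none (some 1)) ++
     PySem.Chars.lower (PySem.List.slice name.toList (some 1) none))

-- ===== PRECONDITION & SPEC =====
def Spec_get_proper_case_name (name : String) (out : String) : Prop := out = get_proper_case_name_alt name
instance (name : String) (out : String) : Decidable (Spec_get_proper_case_name name out) := by unfold Spec_get_proper_case_name; infer_instance

-- ===== CLAIM (what is proved, stated in full; the proofs are below) =====
def Claim_equal_get_proper_case_name : Prop := ∀ (name : String), Dom_get_proper_case_name name → Spec_get_proper_case_name name (get_proper_case_name name)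

-- ===== LEMMAS AND PROOFS =====

-- Tail of the loop: all indices from pre.length ≥ 1 on miss the ch == 0 branch, so the
-- fold just appends the lowercased characters of t in order.
lemma pv_loop (t : List Char) : ∀ (pre acc : List Char), pre ≠ [] →
    (PySem.List.pyRange (pre.length : Int) ((pre.length : Int) + t.length) 1).foldl
      (fun acc ch =>
        if ch == 0 then [PySem.Chars.upperChar (PySem.List.pyGetD (pre ++ t) ch ' ')]
        else acc ++ [PySem.Chars.lowerChar (PySem.List.pyGetD (pre ++ t) ch ' ')])
      acc
    = acc ++ t.map PySem.Chars.lowerChar := by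
  induction t with
  | nil =>
    intro pre acc _
    simp [PySem.List.pyRange]
  | cons c t ih =>
    intro pre acc hpre
    have hlt : (pre.length : Int) < (pre.length : Int) + (c :: t).length := by
      simp
    rw [PySem.List.pyRange_one_cons hlt]
    simp only [List.foldl_cons]
    have hne : ((pre.length : Int) == 0) = false := by
      have : pre.length ≠ 0 := by simpa [List.length_eq_zero_iff] using hpre
      simp [this]
    rw [hne]
    simp only [Bool.false_eq_true, if_false]
    have hget : PySem.List.pyGetD (pre ++ c :: t) (pre.length : Int) ' ' = c := by
      rw [PySem.List.pyGetD_natCast]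
      simp [List.getD]
    rw [hget]
    have hrw : pre ++ c :: t = (pre ++ [c]) ++ t := by simp
    have hlen : (pre.length : Int) + 1 = ((pre ++ [c]).length : Int) := by
      simp
    have hlen2 : (pre.length : Int) + (c :: t).length = ((pre ++ [c]).length : Int) + t.length := by
      simp
      ring
    rw [hrw, hlen, hlen2, ih (pre ++ [c]) _ (by simp)]
    simp

theorem pv_main (name : String) : get_proper_case_name name = get_proper_case_name_alt name := by
  unfold get_proper_case_name get_proper_case_name_alt
  cases h : name.toList with
  | nil => simp [PySem.List.pyRange, PySem.List.slice, PySem.Chars.upper, PySem.Chars.lower]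
  | cons c t =>
    have hlt : (0 : Int) < ((c :: t).length : Int) := by simp
    rw [PySem.List.pyRange_one_cons hlt]
    simp only [List.foldl_cons, beq_self_eq_true, if_true]
    have hget : PySem.List.pyGetD (c :: t) (0 : Int) ' ' = c := by
      simp [PySem.List.pyGetD_zero_cons]
    rw [hget]
    have hrng : ((0 : Int) + 1) = (([c].length : Nat) : Int) := by simp
    have hlen : ((c :: t).length : Int) = (([c].length : Nat) : Int) + t.length := by
      simp
      ring
    have hpre : (c :: t) = [c] ++ t := by simp
    rw [zero_add] at *
    rw [hlen, hpre]
    rw [show PySem.List.pyRange 1 ((([c].length : Nat) : Int) + t.length) 1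
          = PySem.List.pyRange (([c].length : Nat) : Int) ((([c].length : Nat) : Int) + t.length) 1 from by norm_num]
    rw [pv_loop t [c] _ (by simp)]
    have h1 : PySem.List.slice ([c] ++ t) none (some 1) = [c] := by
      have := PySem.List.slice_to ([c] ++ t) (b := 1) (by omega)
      simpa using this
    have h2 : PySem.List.slice ([c] ++ t) (some 1) none = t := by
      have := PySem.List.slice_from ([c] ++ t) (a := 1) (by omega)
      simpa using this
    rw [h1, h2]
    simp [PySem.Chars.upper, PySem.Chars.lower]
-- ===== VERDICT (by name: the statement is the Claim_ definition above) =====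
theorem get_proper_case_name_spec : Claim_equal_get_proper_case_name := by
  intro name _
  exact pv_main name
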